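-- pv_equiv track=rewrite | github.com/CleverUserName420/Theoretical-Technologies-for-the-Public-s-Enjoyment-Open-Source-. | Perhaps.py | situational_awareness
-- ===== SOURCE A (Python) =====
-- from typing import Dict, List, Optional, Tuple, Any, Union, Callable
-- from typing import Dict, List, Optional, Tuple, Any, Union
-- from typing import Dict, List, Optional
-- from typing import Dict, List, Optional, Callable
-- from typing import List, Dict, Any
-- from typing import Dict, List, Optional, Tuple, Any, Union
--
-- def situational_awareness(context: List[str], task: str) -> str:
--     """
--     Assess situation and returns a brief awareness statement.
--     """
--     awareness_points = []
--     keywords = ['delay', 'priority', 'completed', 'uncertain', 'critical', 'risk', 'required', 'optional']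
--     for kw in keywords:
--         for sent in context:
--             if kw in sent.lower():
--                 awareness_points.append(f"{kw} detected in context.")
--     if "urgent" in task.lower():
--         awareness_points.append("Task marked as urgent.")
--     if not awareness_points:
--         return "Situation normal. No immediate signals detected."
--     return "Situational awareness: " + "; ".join(awareness_points)
-- ===== SOURCE B (Python) =====
-- def situational_awareness(context, task):
--     """
--     Assess situation and returns a brief awareness statement.
--     """
--     keywords = ['delay', 'priority', 'completed', 'uncertain', 'critical', 'risk', 'required', 'optional']
--     counts = {}
--     for sent in context:
--         low = sent.lower()
--         for kw in keywords:
--             if kw in low: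
--                 counts[kw] = counts.get(kw, 0) + 1
--     points = [f"{kw} detected in context." for kw in keywords for _ in range(counts.get(kw, 0))]
--     if "urgent" in task.lower():
--         points.append("Task marked as urgent.")
--     if not points:
--         return "Situation normal. No immediate signals detected."
--     return "Situational awareness: " + "; ".join(points)
-- ===== Notes on version B (the rewrite author's own statement) =====
-- stated objective: alternative
-- what changed: B flips the loop nesting: a single sentence-major pass lowercases each sentence once and accumulates a count dict keyed by keyword, then the message list is rebuilt keyword-major by replicating each message count times, instead of A's keyword-major nested loops that re-lowercase every sentence for each keyword and append one message per hit.
import Mathlib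
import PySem

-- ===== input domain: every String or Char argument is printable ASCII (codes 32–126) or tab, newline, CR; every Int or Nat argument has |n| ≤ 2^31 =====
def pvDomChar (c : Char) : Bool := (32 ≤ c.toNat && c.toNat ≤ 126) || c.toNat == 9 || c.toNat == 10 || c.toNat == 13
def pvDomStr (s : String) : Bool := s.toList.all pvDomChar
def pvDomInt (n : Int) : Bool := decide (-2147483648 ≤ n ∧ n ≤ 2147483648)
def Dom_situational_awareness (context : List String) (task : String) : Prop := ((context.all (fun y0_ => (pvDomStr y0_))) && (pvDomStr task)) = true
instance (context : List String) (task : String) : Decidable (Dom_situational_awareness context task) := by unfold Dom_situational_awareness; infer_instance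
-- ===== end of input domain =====

-- B flips the loop nesting: one sentence-major pass lowercases each sentence once and counts the
-- hits per keyword in a dict, then rebuilds the message list keyword-major by replicating each
-- message its count many times; alternative decomposition, same cost class.

-- ===== PORT A =====
def situational_awareness (context : List String) (task : String) : String :=
  let keywords : List String :=
    ["delay", "priority", "completed", "uncertain", "critical", "risk", "required", "optional"]
  let awareness_points : List String :=
    keywords.foldl (fun acc kw =>
      context.foldl (fun acc2 sent =>
        if PySem.Str.isIn kw (PySem.Str.lower sent) then
          acc2 ++ [kw ++ " detected in context."]
        else acc2) acc) []
  let awareness_points :=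
    if PySem.Str.isIn "urgent" (PySem.Str.lower task) then
      awareness_points ++ ["Task marked as urgent."]
    else awareness_points
  if awareness_points = [] then "Situation normal. No immediate signals detected."
  else "Situational awareness: " ++ PySem.Str.join "; " awareness_points

-- ===== PORT B =====
def situational_awareness_alt (context : List String) (task : String) : String :=
  let keywords : List String :=
    ["delay", "priority", "completed", "uncertain", "critical", "risk", "required", "optional"]
  let counts : PySem.Dict String Int :=
    context.foldl (fun d sent =>
      let low := PySem.Str.lower sent
      keywords.foldl (fun d2 kw =>
        if PySem.Str.isIn kw low then d2.insert kw (d2.getD kw 0 + 1) else d2) d)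
      PySem.Dict.empty
  let points : List String :=
    keywords.flatMap (fun kw =>
      List.replicate (counts.getD kw 0).toNat (kw ++ " detected in context."))
  let points :=
    if PySem.Str.isIn "urgent" (PySem.Str.lower task) then
      points ++ ["Task marked as urgent."]
    else points
  if points = [] then "Situation normal. No immediate signals detected."
  else "Situational awareness: " ++ PySem.Str.join "; " points

-- ===== PRECONDITION & SPEC =====
def Spec_situational_awareness (context : List String) (task : String) (out : String) : Prop := out = situational_awareness_alt context task
instance (context : List String) (task : String) (out : String) : Decidable (Spec_situational_awareness context task out) := by unfold Spec_situational_awareness; infer_instance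

-- ===== CLAIM (what is proved, stated in full; the proofs are below) =====
def Claim_equal_situational_awareness : Prop := ∀ (context : List String) (task : String), Dom_situational_awareness context task → Spec_situational_awareness context task (situational_awareness context task)

-- ===== LEMMAS AND PROOFS =====

-- B's count dict after the sentence-major pass: the entry for any keyword of the (Nodup) keyword
-- list is the number of sentences whose lowercasing contains it.
lemma counts_getD (keywords : List String) (hnd : keywords.Nodup) (kw : String)
    (hmem : kw ∈ keywords) (context : List String) (d : PySem.Dict String Int) :
    (context.foldl (fun d sent =>
      keywords.foldl (fun d2 kw' =>
        if PySem.Str.isIn kw' (PySem.Str.lower sent) then d2.insert kw' (d2.getD kw' 0 + 1)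
        else d2) d) d).getD kw 0
      = d.getD kw 0 + (context.countP (fun sent => PySem.Str.isIn kw (PySem.Str.lower sent)) : Int) := by
  induction context generalizing d with
  | nil => simp
  | cons sent rest ih =>
    rw [List.foldl_cons, ih, List.countP_cons]
    have hstep : (keywords.foldl (fun d2 kw' =>
        if PySem.Str.isIn kw' (PySem.Str.lower sent) then d2.insert kw' (d2.getD kw' 0 + 1)
        else d2) d).getD kw 0
        = d.getD kw 0 + if PySem.Str.isIn kw (PySem.Str.lower sent) then 1 else 0 := by
      rw [← List.foldl_filter, PySem.Dict.getD_foldl_insert_add_one]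
      cases hin : PySem.Str.isIn kw (PySem.Str.lower sent)
      · have hc : List.count kw (keywords.filter fun kw' =>
            PySem.Str.isIn kw' (PySem.Str.lower sent)) = 0 :=
          List.count_eq_zero.mpr (fun hmf => by
            have h2 := (List.mem_filter.mp hmf).2
            simp only [hin] at h2
            exact Bool.false_ne_true h2)
        rw [hc]
        simp
      · have hc : List.count kw (keywords.filter fun kw' =>
            PySem.Str.isIn kw' (PySem.Str.lower sent)) = 1 :=
          List.count_eq_one_of_mem (hnd.filter _) (List.mem_filter.mpr ⟨hmem, hin⟩)
        rw [hc]
        simp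
    rw [hstep]
    cases hin : PySem.Str.isIn kw (PySem.Str.lower sent) <;> push_cast <;> simp <;> ring

-- A's inner sentence loop appends exactly count-many copies of the keyword's message.
lemma foldl_if_append_eq_replicate {A B : Type} (p : A → Bool) (m : B) (xs : List A)
    (acc : List B) :
    xs.foldl (fun a x => if p x then a ++ [m] else a) acc
      = acc ++ List.replicate (xs.countP p) m := by
  rw [PySem.List.foldl_append_if p (fun _ => m) xs acc]
  congr 1
  rw [List.map_const', List.countP_eq_length_filter]

-- A's keyword-major nested loop and B's count-then-replicate build the same message list.
lemma points_eq (context : List String) :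
    (["delay", "priority", "completed", "uncertain", "critical", "risk", "required",
      "optional"] : List String).foldl (fun acc kw =>
        context.foldl (fun acc2 sent =>
          if PySem.Str.isIn kw (PySem.Str.lower sent) then
            acc2 ++ [kw ++ " detected in context."] else acc2) acc) []
    = (["delay", "priority", "completed", "uncertain", "critical", "risk", "required",
        "optional"] : List String).flatMap (fun kw =>
        List.replicate ((context.foldl (fun d sent =>
          (["delay", "priority", "completed", "uncertain", "critical", "risk", "required",
            "optional"] : List String).foldl (fun d2 kw' =>
            if PySem.Str.isIn kw' (PySem.Str.lower sent) then d2.insert kw' (d2.getD kw' 0 + 1)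
            else d2) d) (PySem.Dict.empty : PySem.Dict String Int)).getD kw 0).toNat
          (kw ++ " detected in context.")) := by
  simp only [foldl_if_append_eq_replicate]
  rw [PySem.List.foldl_append_eq_flatMap
    (fun kw => List.replicate (context.countP fun sent => PySem.Str.isIn kw (PySem.Str.lower sent))
      (kw ++ " detected in context.")), List.nil_append]
  apply List.flatMap_congr
  intro kw hmem
  rw [counts_getD _ (by decide) kw hmem context PySem.Dict.empty]
  simp

-- ===== VERDICT (by name: the statement is the Claim_ definition above) =====
theorem situational_awareness_spec : Claim_equal_situational_awareness := by
  intro context task _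
  show _ = _
  unfold situational_awareness situational_awareness_alt
  simp only [points_eq]
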